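-- pv_equiv track=rewrite | github.com/micheldiab/Sudoku | Check_Board.py | solve
-- ===== SOURCE A (Python) =====
-- def solve(board):
--
--     find = find_empty(board)
--     if not find:
--         return True
--     else:
--         row, col = find
--
--     for i in range(1,10):
--         if valid(board, i, (row, col)):
--             board[row][col] = i
--
--             if solve(board):
--                 return True
--
--             board[row][col] = 0
--
--     return False
--
-- def valid(board, num, pos):
--     # Check row
--     for i in range(len(board[0])):
--         if board[pos[0]][i] == num and pos[1] != i:
--             return False
--
--     # Check column
--     for i in range(len(board)):
--         if board[i][pos[1]] == num and pos[0] != i: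
--             return False
--     # Check box
--     x = pos[0] // 3
--     y = pos[1] // 3
--
--     for i in range(x*3,x*3 + 3):
--         for j in range(y * 3, y*3 + 3):
--             if board[i][j] == num and (i,j) != pos:
--                 return False
--     return True
--
-- def find_empty(board):
--     for i in range(len(board)):
--         for j in range(len(board[0])):
--             if board[i][j] == 0:
--                 return (i, j)
--
--     return None
-- ===== SOURCE B (Python) =====
-- def solve(board):
--     # Collect the empty cells of the scanned rectangle once; if there are none the
--     # board is already solved.  Otherwise backtrack over that list, with row/column/box
--     # occupancy sets maintained incrementally for O(1) validity checks.
--     # Like A, fills `board` in place (solution left in place when solvable).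
--     cols = len(board[0]) if board else 0
--     empties = [(i, j) for i in range(len(board)) for j in range(cols) if board[i][j] == 0]
--     if not empties:
--         return True
--     rows = [set() for _ in range(9)]
--     cols_used = [set() for _ in range(9)]
--     boxes = [set() for _ in range(9)]
--     for i in range(9):
--         for j in range(9):
--             v = board[i][j]
--             if v != 0:
--                 rows[i].add(v)
--                 cols_used[j].add(v)
--                 boxes[i // 3 * 3 + j // 3].add(v)
--
--     def bt(k):
--         if k == len(empties):
--             return True
--         i, j = empties[k]
--         b = i // 3 * 3 + j // 3
--         for v in range(1, 10):
--             if v not in rows[i] and v not in cols_used[j] and v not in boxes[b]: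
--                 rows[i].add(v)
--                 cols_used[j].add(v)
--                 boxes[b].add(v)
--                 board[i][j] = v
--                 if bt(k + 1):
--                     return True
--                 rows[i].remove(v)
--                 cols_used[j].remove(v)
--                 boxes[b].remove(v)
--                 board[i][j] = 0
--         return False
--
--     return bt(0)
-- ===== Notes on version B (the rewrite author's own statement) =====
-- stated objective: faster
-- what changed: A rescans the row, column and 3x3 box (27 cells) for every candidate digit and rescans the whole board for the next empty cell; B precomputes the list of empty cells once and maintains row/column/box occupancy sets incrementally, so each validity check and each next-cell step is O(1) while the backtracking tree is identical.
-- outside the precondition, e.g. on solve([[0, 0, 0], [0, 0, 0], [0, 0, 0]]): A returns True, B raises IndexError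
import Mathlib
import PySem

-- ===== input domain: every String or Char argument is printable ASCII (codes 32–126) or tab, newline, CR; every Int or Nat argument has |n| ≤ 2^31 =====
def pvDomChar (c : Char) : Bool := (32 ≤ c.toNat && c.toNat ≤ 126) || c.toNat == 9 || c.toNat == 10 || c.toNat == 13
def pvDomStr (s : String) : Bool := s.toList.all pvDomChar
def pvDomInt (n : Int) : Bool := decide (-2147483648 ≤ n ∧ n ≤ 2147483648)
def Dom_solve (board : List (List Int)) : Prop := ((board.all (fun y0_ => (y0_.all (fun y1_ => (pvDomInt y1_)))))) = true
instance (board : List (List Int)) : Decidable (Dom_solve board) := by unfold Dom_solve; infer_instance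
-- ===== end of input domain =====

-- B replaces A's per-digit rescans of row/column/box (27 cells each) by row/column/box
-- occupancy sets maintained incrementally, backtracking over a precomputed list of the
-- empty cells (constant-factor speed-up; same search tree). Both Pythons fill `board`
-- in place; the equivalence proved here is about the return value (the mutations agree too).

-- board[i][j] read/write; exact on 9×9 boards (Pre_), where every access is in range
def getCell (bd : List (List Int)) (i j : Nat) : Int := (bd.getD i []).getD j 1
def setCell (bd : List (List Int)) (i j : Nat) (v : Int) : List (List Int) :=
  bd.set i ((bd.getD i []).set j v)

-- ===== PORT A =====
def findEmpty (bd : List (List Int)) : Option (Nat × Nat) :=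
  (List.range bd.length).findSome? (fun i =>
    (List.range (bd.headD []).length).findSome? (fun j =>
      if getCell bd i j = 0 then some (i, j) else none))

def validA (bd : List (List Int)) (num : Int) (pos : Nat × Nat) : Bool :=
  ((List.range (bd.headD []).length).all (fun i =>
      !(getCell bd pos.1 i == num && pos.2 != i))) &&
  ((List.range bd.length).all (fun i =>
      !(getCell bd i pos.2 == num && pos.1 != i))) &&
  (let x := pos.1 / 3
   let y := pos.2 / 3
   (List.range' (x * 3) 3).all (fun i => (List.range' (y * 3) 3).all (fun j =>
      !(getCell bd i j == num && (i, j) != pos))))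

-- the two mutually recursive functions are A's `solve` body and its `for i in range(1,10)` loop;
-- fuel only makes the recursion total (on 9×9 boards the depth is ≤ 81, so 82 never runs out);
-- trying the next digit after a failed recursive call uses the original `bd`, which is exactly
-- the board Python restores with `board[row][col] = 0`
-- A's inner `for i in range(1,10)` loop; `go` is the recursive call to `solve`
def tryA (go : List (List Int) → Bool) (bd : List (List Int)) (r c : Nat) : List Int → Bool
  | [] => false
  | d :: ds =>
      if validA bd d (r, c) then
        (if go (setCell bd r c d) then true else tryA go bd r c ds)
      else tryA go bd r c ds

def solveFuelA : Nat → List (List Int) → Bool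
  | 0, _ => false
  | f + 1, bd =>
      match findEmpty bd with
      | none => true
      | some (r, c) => tryA (solveFuelA f) bd r c (PySem.List.pyRange 1 10 1)


def solve (board : List (List Int)) : Bool := solveFuelA 82 board

-- ===== PORT B =====
def boxIdx (i j : Nat) : Nat := i / 3 * 3 + j / 3

def cells81 : List (Nat × Nat) :=
  (List.range 9).flatMap (fun i => (List.range 9).map (fun j => (i, j)))

-- B's list comprehension: the empty cells of the scanned rectangle, in row-major order
def emptiesB (bd : List (List Int)) : List (Nat × Nat) :=
  ((List.range bd.length).flatMap (fun i =>
      (List.range (bd.headD []).length).map (fun j => (i, j)))).filter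
    (fun p => getCell bd p.1 p.2 == 0)

-- B's 9×9 double loop filling the row/column/box occupancy sets
-- the body of B's initial double loop
def stepB (bd : List (List Int))
    (s : List (PySem.Set Int) × List (PySem.Set Int) × List (PySem.Set Int))
    (p : Nat × Nat) :
    List (PySem.Set Int) × List (PySem.Set Int) × List (PySem.Set Int) :=
  let v := getCell bd p.1 p.2
  if v = 0 then s
  else (s.1.set p.1 (PySem.Set.add (s.1.getD p.1 []) v),
        s.2.1.set p.2 (PySem.Set.add (s.2.1.getD p.2 []) v),
        s.2.2.set (boxIdx p.1 p.2) (PySem.Set.add (s.2.2.getD (boxIdx p.1 p.2) []) v))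

def initB (bd : List (List Int)) :
    List (PySem.Set Int) × List (PySem.Set Int) × List (PySem.Set Int) :=
  cells81.foldl (stepB bd) (List.replicate 9 [], List.replicate 9 [], List.replicate 9 [])

-- B's `bt(k)` and its digit loop; the undo branch reuses the pre-add sets and board,
-- which are exactly the values Python's remove/`board[i][j] = 0` restore
-- B's inner `for v in range(1,10)` loop; `go` is the recursive call bt(k+1)
def tryB (go : List (PySem.Set Int) → List (PySem.Set Int) → List (PySem.Set Int) →
      List (List Int) → Bool)
    (R C X : List (PySem.Set Int)) (bd : List (List Int)) (i j : Nat) : List Int → Bool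
  | [] => false
  | v :: ds =>
      if !(PySem.Set.contains (R.getD i []) v) && !(PySem.Set.contains (C.getD j []) v)
          && !(PySem.Set.contains (X.getD (boxIdx i j) []) v) then
        (if go (R.set i (PySem.Set.add (R.getD i []) v))
               (C.set j (PySem.Set.add (C.getD j []) v))
               (X.set (boxIdx i j) (PySem.Set.add (X.getD (boxIdx i j) []) v))
               (setCell bd i j v)
         then true else tryB go R C X bd i j ds)
      else tryB go R C X bd i j ds

def btB (R C X : List (PySem.Set Int)) (bd : List (List Int)) : List (Nat × Nat) → Bool
  | [] => true
  | (i, j) :: rest =>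
      tryB (fun R' C' X' bd' => btB R' C' X' bd' rest) R C X bd i j (PySem.List.pyRange 1 10 1)


def solve_alt (board : List (List Int)) : Bool :=
  let E := emptiesB board
  if E = [] then true
  else
    match initB board with
    | (R, C, X) => btB R C X board E

-- ===== PRECONDITION & SPEC =====
-- Pre_ admits 9×9 boards (the game's natural domain) and boards whose scanned rectangle
-- (len(board) rows × len(board[0]) columns) contains no empty cell, on which A returns True
-- without ever checking a digit.  Excluded are non-9×9 boards that do contain an empty
-- cell in that rectangle: there A either raises IndexError (its fixed 3×3 box scan leaves
-- the board) or backtracks over an accidental truncated region (tiny boards), while B,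
-- whose solver is written for the 9×9 game, raises IndexError.
def Pre_solve (board : List (List Int)) : Prop :=
  (board.length = 9 ∧ ∀ r ∈ board, r.length = 9) ∨
  ((∀ r ∈ board, (board.headD []).length ≤ r.length) ∧
    ∀ r ∈ board, ∀ j < (board.headD []).length, r.getD j 1 ≠ 0)
instance (board : List (List Int)) : Decidable (Pre_solve board) := by
  unfold Pre_solve; infer_instance

def pvWitness_solve : List (List Int) :=
  [[5,3,0,0,7,0,0,0,0],[6,0,0,1,9,5,0,0,0],[0,9,8,0,0,0,0,6,0],
   [8,0,0,0,6,0,0,0,3],[4,0,0,8,0,3,0,0,1],[7,0,0,0,2,0,0,0,6],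
   [0,6,0,0,0,0,2,8,0],[0,0,0,4,1,9,0,0,5],[0,0,0,0,8,0,0,7,9]]

def Spec_solve (board : List (List Int)) (out : Bool) : Prop := out = solve_alt board
instance (board : List (List Int)) (out : Bool) : Decidable (Spec_solve board out) := by
  unfold Spec_solve; infer_instance

-- ===== CLAIM (what is proved, stated in full; the proofs are below) =====
def Claim_equal_solve : Prop :=
  ∀ (board : List (List Int)), Dom_solve board → Pre_solve board → Spec_solve board (solve board)

-- ===== LEMMAS AND PROOFS =====

-- proof-side shorthand: the board is a 9×9 grid (the first disjunct of Pre_solve)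
def Sq9 (bd : List (List Int)) : Prop := bd.length = 9 ∧ ∀ r ∈ bd, r.length = 9

-- the zero cells of a 9×9 board, in A's row-major search order
def empties9 (bd : List (List Int)) : List (Nat × Nat) :=
  cells81.filter (fun p => getCell bd p.1 p.2 == 0)

-- the sets R/C/X hold exactly the nonzero values of bd's rows/columns/boxes
def MaskInv (bd : List (List Int)) (R C X : List (PySem.Set Int)) : Prop :=
  R.length = 9 ∧ C.length = 9 ∧ X.length = 9 ∧
  (∀ i < 9, ∀ v : Int, v ∈ R.getD i [] ↔ v ≠ 0 ∧ ∃ j < 9, getCell bd i j = v) ∧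
  (∀ j < 9, ∀ v : Int, v ∈ C.getD j [] ↔ v ≠ 0 ∧ ∃ i < 9, getCell bd i j = v) ∧
  (∀ b < 9, ∀ v : Int, v ∈ X.getD b [] ↔
      v ≠ 0 ∧ ∃ i < 9, ∃ j < 9, boxIdx i j = b ∧ getCell bd i j = v)

theorem mem_cells81 (p : Nat × Nat) : p ∈ cells81 ↔ p.1 < 9 ∧ p.2 < 9 := by
  obtain ⟨i, j⟩ := p
  simp only [cells81, List.mem_flatMap, List.mem_map, List.mem_range]
  constructor
  · rintro ⟨a, ha, b, hb, h⟩
    obtain ⟨e1, e2⟩ := Prod.mk.inj h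
    exact ⟨e1 ▸ ha, e2 ▸ hb⟩
  · rintro ⟨hi, hj⟩
    exact ⟨i, hi, ⟨j, hj, rfl⟩⟩

theorem nodup_cells81 : cells81.Nodup := by decide

theorem length_cells81 : cells81.length = 81 := by decide

theorem getD_set' {α : Type} (l : List α) (n : Nat) (a d : α) (i : Nat) (hn : n < l.length) :
    (l.set n a).getD i d = if i = n then a else l.getD i d := by
  induction l generalizing n i with
  | nil => simp at hn
  | cons x l ih =>
    cases n with
    | zero =>
      cases i with
      | zero => simp
      | succ i => simp
    | succ n =>
      have hn' : n < l.length := by simpa using hn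
      cases i with
      | zero => simp
      | succ i =>
        have hrec := ih n i hn'
        simp only [List.set_cons_succ, List.getD_cons_succ]
        rw [hrec]
        by_cases h : i = n <;> simp [h]

theorem getD_replicate9 (i : Nat) :
    (List.replicate 9 ([] : PySem.Set Int)).getD i [] = [] := by
  rw [List.getD_eq_getElem?_getD, List.getElem?_replicate]
  split <;> rfl

-- removing the head of a filtered nodup list by falsifying the predicate exactly there
theorem filter_falsify_head {α : Type} (l : List α) (p q : α → Bool) (x : α) (rest : List α)
    (hnd : l.Nodup) (hf : l.filter p = x :: rest)
    (hagree : ∀ y ∈ l, y ≠ x → q y = p y) (hqx : q x = false) :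
    l.filter q = rest := by
  induction l generalizing rest with
  | nil => simp at hf
  | cons a l ih =>
    rw [List.nodup_cons] at hnd
    cases hpa : p a with
    | false =>
      have hax : a ≠ x := by
        intro h; subst h
        have hmem : a ∈ List.filter p l := by
          have h1 : a ∈ a :: rest := by simp
          rw [← hf] at h1
          simpa [List.filter_cons, hpa] using h1
        exact hnd.1 (List.mem_of_mem_filter hmem)
      have hqa : q a = p a := hagree a (by simp) hax
      rw [List.filter_cons_of_neg (by simp [hqa, hpa])]
      rw [List.filter_cons_of_neg (by simp [hpa])] at hf
      exact ih rest hnd.2 hf (fun y hy hyx => hagree y (by simp [hy]) hyx)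
    | true =>
      rw [List.filter_cons_of_pos hpa] at hf
      obtain ⟨hax, hrest⟩ := List.cons.inj hf
      subst hax
      rw [List.filter_cons_of_neg (by simp [hqx])]
      calc l.filter q = l.filter p := by
            apply List.filter_congr
            intro y hy
            exact hagree y (by simp [hy]) (fun h => hnd.1 (h ▸ hy))
        _ = rest := hrest

theorem headRow_len {bd : List (List Int)} (hpre : Sq9 bd) : (bd.headD []).length = 9 := by
  obtain ⟨hlen, hrows⟩ := hpre
  cases bd with
  | nil => simp at hlen
  | cons r l => exact hrows r (by simp)

theorem row_len {bd : List (List Int)} (hpre : Sq9 bd) {i : Nat} (hi : i < 9) :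
    (bd.getD i []).length = 9 := by
  have h9 := hpre.1
  have hib : i < bd.length := by omega
  have hmem : bd.getD i [] ∈ bd := by
    rw [List.getD_eq_getElem?_getD, List.getElem?_eq_getElem hib]
    exact List.getElem_mem hib
  exact hpre.2 _ hmem

theorem pre9_setCell {bd : List (List Int)} (hpre : Sq9 bd) {i : Nat} (hi : i < 9)
    (j : Nat) (v : Int) : Sq9 (setCell bd i j v) := by
  refine ⟨by simp [setCell, hpre.1], ?_⟩
  intro r hr
  rcases List.mem_or_eq_of_mem_set hr with h | h
  · exact hpre.2 r h
  · subst h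
    rw [List.length_set]
    exact row_len hpre hi

theorem getCell_setCell {bd : List (List Int)} (hpre : Sq9 bd) {i j : Nat}
    (hi : i < 9) (hj : j < 9) (v : Int) (i' j' : Nat) :
    getCell (setCell bd i j v) i' j' =
      if i' = i ∧ j' = j then v else getCell bd i' j' := by
  have h9 := hpre.1
  have hrl := row_len hpre hi
  unfold getCell setCell
  rw [getD_set' bd i ((bd.getD i []).set j v) [] i' (by omega)]
  by_cases hii : i' = i
  · rw [if_pos hii, getD_set' (bd.getD i []) j v 1 j' (by omega)]
    by_cases hjj : j' = j
    · rw [if_pos hjj, if_pos ⟨hii, hjj⟩]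
    · rw [if_neg hjj, if_neg (by tauto), hii]
  · rw [if_neg hii, if_neg (by tauto)]

theorem head_empties9 {bd : List (List Int)} {r c : Nat} {rest : List (Nat × Nat)}
    (hE : empties9 bd = (r, c) :: rest) : r < 9 ∧ c < 9 ∧ getCell bd r c = 0 := by
  have hm : (r, c) ∈ empties9 bd := by rw [hE]; simp
  unfold empties9 at hm
  rw [List.mem_filter] at hm
  have h1 := (mem_cells81 (r, c)).mp hm.1
  refine ⟨h1.1, h1.2, ?_⟩
  simpa using hm.2

theorem empties9_setCell {bd : List (List Int)} {r c : Nat} {rest : List (Nat × Nat)}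
    (hpre : Sq9 bd) (hE : empties9 bd = (r, c) :: rest) {v : Int} (hv : v ≠ 0) :
    empties9 (setCell bd r c v) = rest := by
  obtain ⟨hr, hc, h0⟩ := head_empties9 hE
  apply filter_falsify_head cells81 _ _ (r, c) rest nodup_cells81 hE
  · intro y _ hy
    show (getCell (setCell bd r c v) y.1 y.2 == 0) = (getCell bd y.1 y.2 == 0)
    rw [getCell_setCell hpre hr hc v y.1 y.2]
    have hne : ¬(y.1 = r ∧ y.2 = c) := by
      intro h
      exact hy (Prod.ext h.1 h.2)
    simp [hne]
  · show (getCell (setCell bd r c v) r c == 0) = false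
    rw [getCell_setCell hpre hr hc v r c]
    simp [hv]

theorem mem_getD_set_add (L : List (PySem.Set Int)) (n : Nat) (hn : n < L.length)
    (d v : Int) (i : Nat) :
    (v ∈ (L.set n (PySem.Set.add (L.getD n []) d)).getD i []) ↔
      (v ∈ L.getD i [] ∨ (i = n ∧ v = d)) := by
  rw [getD_set' L n _ [] i hn]
  by_cases h : i = n
  · subst h
    simp [PySem.Set.mem_add]
  · simp [h]

theorem boxIdx_lt {r c : Nat} (hr : r < 9) (hc : c < 9) : boxIdx r c < 9 := by
  unfold boxIdx; omega

theorem boxIdx_mem_iff {r c i j : Nat} (hr : r < 9) (hc : c < 9) :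
    (i < 9 ∧ j < 9 ∧ boxIdx i j = boxIdx r c) ↔
      (r / 3 * 3 ≤ i ∧ i < r / 3 * 3 + 3 ∧ c / 3 * 3 ≤ j ∧ j < c / 3 * 3 + 3) := by
  unfold boxIdx; omega

theorem maskInv_set {bd : List (List Int)} {R C X : List (PySem.Set Int)}
    (hpre : Sq9 bd) {r c : Nat} (hr : r < 9) (hc : c < 9)
    (h0 : getCell bd r c = 0) {d : Int} (hd : d ≠ 0) (hinv : MaskInv bd R C X) :
    MaskInv (setCell bd r c d)
      (R.set r (PySem.Set.add (R.getD r []) d))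
      (C.set c (PySem.Set.add (C.getD c []) d))
      (X.set (boxIdx r c) (PySem.Set.add (X.getD (boxIdx r c) []) d)) := by
  obtain ⟨hR, hC, hX, hRm, hCm, hXm⟩ := hinv
  have hbox := boxIdx_lt hr hc
  refine ⟨by simp [hR], by simp [hC], by simp [hX], ?_, ?_, ?_⟩
  · intro i hi v
    rw [mem_getD_set_add R r (by omega) d v i, hRm i hi v]
    constructor
    · rintro (⟨hv, j, hj, hcell⟩ | ⟨hir, hvd⟩)
      · refine ⟨hv, j, hj, ?_⟩
        rw [getCell_setCell hpre hr hc d i j]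
        have hne : ¬(i = r ∧ j = c) := by
          rintro ⟨h1, h2⟩; subst h1; subst h2; rw [h0] at hcell; exact hv hcell.symm
        simp [hne, hcell]
      · refine ⟨by rw [hvd]; exact hd, c, hc, ?_⟩
        rw [hir, getCell_setCell hpre hr hc d r c, if_pos ⟨rfl, rfl⟩, hvd]
    · rintro ⟨hv, j, hj, hcell⟩
      rw [getCell_setCell hpre hr hc d i j] at hcell
      by_cases hij : i = r ∧ j = c
      · right
        rw [if_pos hij] at hcell
        exact ⟨hij.1, hcell.symm⟩
      · left
        rw [if_neg hij] at hcell
        exact ⟨hv, j, hj, hcell⟩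
  · intro j hj v
    rw [mem_getD_set_add C c (by omega) d v j, hCm j hj v]
    constructor
    · rintro (⟨hv, i, hi, hcell⟩ | ⟨hjc, hvd⟩)
      · refine ⟨hv, i, hi, ?_⟩
        rw [getCell_setCell hpre hr hc d i j]
        have hne : ¬(i = r ∧ j = c) := by
          rintro ⟨h1, h2⟩; subst h1; subst h2; rw [h0] at hcell; exact hv hcell.symm
        simp [hne, hcell]
      · refine ⟨by rw [hvd]; exact hd, r, hr, ?_⟩
        rw [hjc, getCell_setCell hpre hr hc d r c, if_pos ⟨rfl, rfl⟩, hvd]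
    · rintro ⟨hv, i, hi, hcell⟩
      rw [getCell_setCell hpre hr hc d i j] at hcell
      by_cases hij : i = r ∧ j = c
      · right
        rw [if_pos hij] at hcell
        exact ⟨hij.2, hcell.symm⟩
      · left
        rw [if_neg hij] at hcell
        exact ⟨hv, i, hi, hcell⟩
  · intro b hb v
    rw [mem_getD_set_add X (boxIdx r c) (by omega) d v b, hXm b hb v]
    constructor
    · rintro (⟨hv, i, hi, j, hj, hbox', hcell⟩ | ⟨hbb, hvd⟩)
      · refine ⟨hv, i, hi, j, hj, hbox', ?_⟩
        rw [getCell_setCell hpre hr hc d i j]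
        have hne : ¬(i = r ∧ j = c) := by
          rintro ⟨h1, h2⟩; subst h1; subst h2; rw [h0] at hcell; exact hv hcell.symm
        simp [hne, hcell]
      · refine ⟨by rw [hvd]; exact hd, r, hr, c, hc, hbb.symm, ?_⟩
        rw [getCell_setCell hpre hr hc d r c, if_pos ⟨rfl, rfl⟩, hvd]
    · rintro ⟨hv, i, hi, j, hj, hbox', hcell⟩
      rw [getCell_setCell hpre hr hc d i j] at hcell
      by_cases hij : i = r ∧ j = c
      · right
        rw [if_pos hij] at hcell
        refine ⟨?_, hcell.symm⟩
        rw [← hbox', hij.1, hij.2]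
      · left
        rw [if_neg hij] at hcell
        exact ⟨hv, i, hi, j, hj, hbox', hcell⟩

theorem validA_eq_mask {bd : List (List Int)} {R C X : List (PySem.Set Int)}
    (hpre : Sq9 bd) {r c : Nat} (hr : r < 9) (hc : c < 9)
    (h0 : getCell bd r c = 0) {d : Int} (hd : d ≠ 0) (hinv : MaskInv bd R C X) :
    validA bd d (r, c) =
      (!(PySem.Set.contains (R.getD r []) d) && !(PySem.Set.contains (C.getD c []) d)
        && !(PySem.Set.contains (X.getD (boxIdx r c) []) d)) := by
  obtain ⟨hR, hC, hX, hRm, hCm, hXm⟩ := hinv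
  have hrow : ((List.range 9).all fun i => !(getCell bd r i == d && (c != i))) = true ↔
      d ∉ R.getD r [] := by
    rw [List.all_eq_true]
    constructor
    · intro h hmem
      obtain ⟨hv, j, hj, hcell⟩ := (hRm r hr d).mp hmem
      have hcj : c ≠ j := by
        intro e; subst e; rw [h0] at hcell; exact hd hcell.symm
      have h2 := h j (List.mem_range.mpr hj)
      simp [hcell, hcj] at h2
    · intro h j hjmem
      have hcell : getCell bd r j ≠ d := by
        by_cases hjc : j = c
        · subst hjc; rw [h0]; exact fun e => hd e.symm
        · intro e
          exact h ((hRm r hr d).mpr ⟨hd, j, List.mem_range.mp hjmem, e⟩)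
      simp [hcell]
  have hcol : ((List.range 9).all fun i => !(getCell bd i c == d && (r != i))) = true ↔
      d ∉ C.getD c [] := by
    rw [List.all_eq_true]
    constructor
    · intro h hmem
      obtain ⟨hv, i, hi, hcell⟩ := (hCm c hc d).mp hmem
      have hri : r ≠ i := by
        intro e; subst e; rw [h0] at hcell; exact hd hcell.symm
      have h2 := h i (List.mem_range.mpr hi)
      simp [hcell, hri] at h2
    · intro h i himem
      have hcell : getCell bd i c ≠ d := by
        by_cases hir : i = r
        · subst hir; rw [h0]; exact fun e => hd e.symm
        · intro e
          exact h ((hCm c hc d).mpr ⟨hd, i, List.mem_range.mp himem, e⟩)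
      simp [hcell]
  have hboxiff : ((List.range' (r / 3 * 3) 3).all fun i =>
        (List.range' (c / 3 * 3) 3).all fun j => !(getCell bd i j == d && ((i, j) != (r, c)))) = true ↔
      d ∉ X.getD (boxIdx r c) [] := by
    rw [List.all_eq_true]
    constructor
    · intro h hmem
      obtain ⟨hv, i, hi, j, hj, hbox', hcell⟩ := (hXm (boxIdx r c) (boxIdx_lt hr hc) d).mp hmem
      have hbounds := (boxIdx_mem_iff hr hc).mp ⟨hi, hj, hbox'⟩
      have h2 := h i (List.mem_range'_1.mpr ⟨hbounds.1, hbounds.2.1⟩)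
      rw [List.all_eq_true] at h2
      have h3 := h2 j (List.mem_range'_1.mpr ⟨hbounds.2.2.1, hbounds.2.2.2⟩)
      have hne : (i, j) ≠ (r, c) := by
        intro e
        obtain ⟨e1, e2⟩ := Prod.mk.inj e
        subst e1; subst e2; rw [h0] at hcell; exact hd hcell.symm
      simp [hcell, hne] at h3
    · intro h i himem
      rw [List.all_eq_true]
      intro j hjmem
      have hib := List.mem_range'_1.mp himem
      have hjb := List.mem_range'_1.mp hjmem
      have hij9 : i < 9 ∧ j < 9 ∧ boxIdx i j = boxIdx r c :=
        (boxIdx_mem_iff hr hc).mpr ⟨hib.1, hib.2, hjb.1, hjb.2⟩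
      have hcell : getCell bd i j ≠ d := by
        intro e
        exact h ((hXm (boxIdx r c) (boxIdx_lt hr hc) d).mpr
          ⟨hd, i, hij9.1, j, hij9.2.1, hij9.2.2, e⟩)
      simp [hcell]
  rw [Bool.eq_iff_iff]
  simp only [validA, headRow_len hpre, hpre.1, Bool.and_eq_true, Bool.not_eq_true',
    ← Bool.not_eq_true, PySem.Set.contains_iff]
  constructor
  · rintro ⟨⟨ha, hb⟩, hcb⟩
    exact ⟨⟨by simpa using hrow.mp ha, by simpa using hcol.mp hb⟩, by simpa using hboxiff.mp hcb⟩
  · rintro ⟨⟨ha, hb⟩, hcb⟩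
    exact ⟨⟨hrow.mpr (by simpa using ha), hcol.mpr (by simpa using hb)⟩,
      hboxiff.mpr (by simpa using hcb)⟩

-- invariant of B's initial loop after the cells in `done` have been processed
def InitInv (bd : List (List Int)) (done : List (Nat × Nat))
    (R C X : List (PySem.Set Int)) : Prop :=
  R.length = 9 ∧ C.length = 9 ∧ X.length = 9 ∧
  (∀ i < 9, ∀ v : Int, v ∈ R.getD i [] ↔ v ≠ 0 ∧ ∃ j, (i, j) ∈ done ∧ getCell bd i j = v) ∧
  (∀ j < 9, ∀ v : Int, v ∈ C.getD j [] ↔ v ≠ 0 ∧ ∃ i, (i, j) ∈ done ∧ getCell bd i j = v) ∧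
  (∀ b < 9, ∀ v : Int, v ∈ X.getD b [] ↔
      v ≠ 0 ∧ ∃ i j, (i, j) ∈ done ∧ boxIdx i j = b ∧ getCell bd i j = v)

theorem initInv_snoc_zero {bd : List (List Int)} {done : List (Nat × Nat)}
    {R C X : List (PySem.Set Int)}
    (hinv : InitInv bd done R C X) (p : Nat × Nat) (hv : getCell bd p.1 p.2 = 0) :
    InitInv bd (done ++ [p]) R C X := by
  obtain ⟨hR, hC, hX, hRm, hCm, hXm⟩ := hinv
  obtain ⟨pi, pj⟩ := p
  refine ⟨hR, hC, hX, ?_, ?_, ?_⟩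
  · intro i hi v
    rw [hRm i hi v]
    constructor
    · rintro ⟨h1, j, hj, h2⟩
      exact ⟨h1, j, by simp [hj], h2⟩
    · rintro ⟨h1, j, hj, h2⟩
      refine ⟨h1, j, ?_, h2⟩
      rcases (List.mem_append.mp hj) with h | h
      · exact h
      · simp at h
        obtain ⟨e1, e2⟩ := h
        subst e1; subst e2
        rw [hv] at h2; exact absurd h2.symm h1
  · intro j hj v
    rw [hCm j hj v]
    constructor
    · rintro ⟨h1, i, hi, h2⟩
      exact ⟨h1, i, by simp [hi], h2⟩
    · rintro ⟨h1, i, hi, h2⟩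
      refine ⟨h1, i, ?_, h2⟩
      rcases (List.mem_append.mp hi) with h | h
      · exact h
      · simp at h
        obtain ⟨e1, e2⟩ := h
        subst e1; subst e2
        rw [hv] at h2; exact absurd h2.symm h1
  · intro b hb v
    rw [hXm b hb v]
    constructor
    · rintro ⟨h1, i, j, hij, h2, h3⟩
      exact ⟨h1, i, j, by simp [hij], h2, h3⟩
    · rintro ⟨h1, i, j, hij, h2, h3⟩
      refine ⟨h1, i, j, ?_, h2, h3⟩
      rcases (List.mem_append.mp hij) with h | h
      · exact h
      · simp at h
        obtain ⟨e1, e2⟩ := h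
        subst e1; subst e2
        rw [hv] at h3; exact absurd h3.symm h1

theorem initInv_snoc_add {bd : List (List Int)} {done : List (Nat × Nat)}
    {R C X : List (PySem.Set Int)}
    (hinv : InitInv bd done R C X) (p : Nat × Nat) (hp : p.1 < 9 ∧ p.2 < 9)
    (hv : getCell bd p.1 p.2 ≠ 0) :
    InitInv bd (done ++ [p])
      (R.set p.1 (PySem.Set.add (R.getD p.1 []) (getCell bd p.1 p.2)))
      (C.set p.2 (PySem.Set.add (C.getD p.2 []) (getCell bd p.1 p.2)))
      (X.set (boxIdx p.1 p.2)
        (PySem.Set.add (X.getD (boxIdx p.1 p.2) []) (getCell bd p.1 p.2))) := by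
  obtain ⟨hR, hC, hX, hRm, hCm, hXm⟩ := hinv
  obtain ⟨pi, pj⟩ := p
  refine ⟨by simp [hR], by simp [hC], by simp [hX], ?_, ?_, ?_⟩
  · intro i hi v
    rw [mem_getD_set_add R pi (by omega) _ v i, hRm i hi v]
    constructor
    · rintro (⟨h1, j, hj, h2⟩ | ⟨e1, e2⟩)
      · exact ⟨h1, j, by simp [hj], h2⟩
      · refine ⟨by rw [e2]; exact hv, pj, by simp [e1], by rw [e1, e2]⟩
    · rintro ⟨h1, j, hj, h2⟩
      rcases (List.mem_append.mp hj) with h | h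
      · exact Or.inl ⟨h1, j, h, h2⟩
      · simp at h
        obtain ⟨e1, e2⟩ := h
        exact Or.inr ⟨e1, by rw [← h2, e1, e2]⟩
  · intro j hj v
    rw [mem_getD_set_add C pj (by omega) _ v j, hCm j hj v]
    constructor
    · rintro (⟨h1, i, hi, h2⟩ | ⟨e1, e2⟩)
      · exact ⟨h1, i, by simp [hi], h2⟩
      · refine ⟨by rw [e2]; exact hv, pi, by simp [e1], by rw [e1, e2]⟩
    · rintro ⟨h1, i, hi, h2⟩
      rcases (List.mem_append.mp hi) with h | h
      · exact Or.inl ⟨h1, i, h, h2⟩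
      · simp at h
        obtain ⟨e1, e2⟩ := h
        exact Or.inr ⟨e2, by rw [← h2, e1, e2]⟩
  · intro b hb v
    rw [mem_getD_set_add X (boxIdx pi pj) (by rw [hX]; exact boxIdx_lt hp.1 hp.2) _ v b,
      hXm b hb v]
    constructor
    · rintro (⟨h1, i, j, hij, h2, h3⟩ | ⟨e1, e2⟩)
      · exact ⟨h1, i, j, by simp [hij], h2, h3⟩
      · refine ⟨by rw [e2]; exact hv, pi, pj, by simp, by rw [e1], by rw [e2]⟩
    · rintro ⟨h1, i, j, hij, h2, h3⟩
      rcases (List.mem_append.mp hij) with h | h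
      · exact Or.inl ⟨h1, i, j, h, h2, h3⟩
      · simp at h
        obtain ⟨e1, e2⟩ := h
        refine Or.inr ⟨by rw [← h2, e1, e2], by rw [← h3, e1, e2]⟩

theorem initB_fold (bd : List (List Int)) :
    ∀ (todo done : List (Nat × Nat)) (R C X : List (PySem.Set Int)),
      InitInv bd done R C X → (∀ p ∈ todo, p.1 < 9 ∧ p.2 < 9) →
      InitInv bd (done ++ todo) (todo.foldl (stepB bd) (R, C, X)).1
        (todo.foldl (stepB bd) (R, C, X)).2.1
        (todo.foldl (stepB bd) (R, C, X)).2.2 := by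
  intro todo
  induction todo with
  | nil =>
    intro done R C X hinv _
    simpa using hinv
  | cons p todo ih =>
    intro done R C X hinv htodo
    by_cases hv : getCell bd p.1 p.2 = 0
    · rw [List.foldl_cons, show stepB bd (R, C, X) p = (R, C, X) from by simp [stepB, hv]]
      have h2 := ih (done ++ [p]) R C X (initInv_snoc_zero hinv p hv)
        (fun q hq => htodo q (by simp [hq]))
      simpa [List.append_assoc] using h2
    · rw [List.foldl_cons,
        show stepB bd (R, C, X) p =
          (R.set p.1 (PySem.Set.add (R.getD p.1 []) (getCell bd p.1 p.2)),
           C.set p.2 (PySem.Set.add (C.getD p.2 []) (getCell bd p.1 p.2)),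
           X.set (boxIdx p.1 p.2)
             (PySem.Set.add (X.getD (boxIdx p.1 p.2) []) (getCell bd p.1 p.2)))
          from by simp [stepB, hv]]
      have h2 := ih (done ++ [p]) _ _ _ (initInv_snoc_add hinv p (htodo p (by simp)) hv)
        (fun q hq => htodo q (by simp [hq]))
      simpa [List.append_assoc] using h2

theorem initB_spec (bd : List (List Int)) :
    MaskInv bd (initB bd).1 (initB bd).2.1 (initB bd).2.2 := by
  have h0 : InitInv bd [] (List.replicate 9 []) (List.replicate 9 []) (List.replicate 9 []) := by
    refine ⟨by simp, by simp, by simp, ?_, ?_, ?_⟩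
    · intro i _ v
      rw [getD_replicate9 i]
      simp
    · intro j _ v
      rw [getD_replicate9 j]
      simp
    · intro b _ v
      rw [getD_replicate9 b]
      simp
  have h1 := initB_fold bd cells81 [] _ _ _ h0 (fun p hp => (mem_cells81 p).mp hp)
  rw [List.nil_append] at h1
  obtain ⟨hR, hC, hX, hRm, hCm, hXm⟩ := h1
  refine ⟨hR, hC, hX, ?_, ?_, ?_⟩
  · intro i hi v
    rw [show (initB bd).1 = (cells81.foldl (stepB bd)
      (List.replicate 9 [], List.replicate 9 [], List.replicate 9 [])).1 from rfl]
    rw [hRm i hi v]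
    constructor
    · rintro ⟨h1, j, hj, h2⟩
      exact ⟨h1, j, ((mem_cells81 (i, j)).mp hj).2, h2⟩
    · rintro ⟨h1, j, hj, h2⟩
      exact ⟨h1, j, (mem_cells81 (i, j)).mpr ⟨hi, hj⟩, h2⟩
  · intro j hj v
    rw [show (initB bd).2.1 = (cells81.foldl (stepB bd)
      (List.replicate 9 [], List.replicate 9 [], List.replicate 9 [])).2.1 from rfl]
    rw [hCm j hj v]
    constructor
    · rintro ⟨h1, i, hi, h2⟩
      exact ⟨h1, i, ((mem_cells81 (i, j)).mp hi).1, h2⟩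
    · rintro ⟨h1, i, hi, h2⟩
      exact ⟨h1, i, (mem_cells81 (i, j)).mpr ⟨hi, hj⟩, h2⟩
  · intro b hb v
    rw [show (initB bd).2.2 = (cells81.foldl (stepB bd)
      (List.replicate 9 [], List.replicate 9 [], List.replicate 9 [])).2.2 from rfl]
    rw [hXm b hb v]
    constructor
    · rintro ⟨h1, i, j, hij, h2, h3⟩
      have := (mem_cells81 (i, j)).mp hij
      exact ⟨h1, i, this.1, j, this.2, h2, h3⟩
    · rintro ⟨h1, i, hi, j, hj, h2, h3⟩
      exact ⟨h1, i, j, (mem_cells81 (i, j)).mpr ⟨hi, hj⟩, h2, h3⟩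

theorem findSome?_flatMap' {α β γ : Type} (l : List α) (g : α → List β) (f : β → Option γ) :
    (l.flatMap g).findSome? f = l.findSome? (fun a => (g a).findSome? f) := by
  induction l with
  | nil => rfl
  | cons a l ih =>
    rw [List.flatMap_cons, List.findSome?_append, List.findSome?_cons]
    cases h : (g a).findSome? f with
    | none => simpa [h] using ih
    | some b => simp [h]

theorem findSome?_guard {α : Type} (l : List α) (p : α → Bool) :
    l.findSome? (fun a => if p a then some a else none) = (l.filter p).head? := by
  induction l with
  | nil => rfl
  | cons a l ih =>
    by_cases h : p a <;> simp [List.findSome?_cons, List.filter_cons, h, ih]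

theorem findEmpty_eq (bd : List (List Int)) : findEmpty bd = (emptiesB bd).head? := by
  unfold findEmpty emptiesB
  rw [← findSome?_guard, findSome?_flatMap']
  simp only [List.findSome?_map]
  congr 1
  funext i
  congr 1
  funext j
  by_cases h : getCell bd i j = 0 <;> simp [Function.comp, h]

theorem getD_mem {bd : List (List Int)} {i : Nat} (hi : i < bd.length) :
    bd.getD i [] ∈ bd := by
  rw [List.getD_eq_getElem?_getD, List.getElem?_eq_getElem hi]
  exact List.getElem_mem hi

theorem emptiesB_eq_empties9 {bd : List (List Int)} (h9 : Sq9 bd) :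
    emptiesB bd = empties9 bd := by
  unfold emptiesB empties9 cells81
  rw [h9.1, headRow_len h9]

theorem emptiesB_nil {bd : List (List Int)}
    (h : (∀ r ∈ bd, (bd.headD []).length ≤ r.length) ∧
      ∀ r ∈ bd, ∀ j < (bd.headD []).length, r.getD j 1 ≠ 0) :
    emptiesB bd = [] := by
  unfold emptiesB
  rw [List.filter_eq_nil_iff]
  intro p hp
  simp only [List.mem_flatMap, List.mem_map, List.mem_range] at hp
  obtain ⟨i, hi, j, hj, hpij⟩ := hp
  obtain ⟨e1, e2⟩ := Prod.mk.inj hpij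
  have hne := h.2 (bd.getD i []) (getD_mem hi) j hj
  simp only [← e1, ← e2, getCell]
  simpa using hne

theorem length_empties9 (bd : List (List Int)) : (empties9 bd).length ≤ 81 := by
  calc (empties9 bd).length ≤ cells81.length := List.length_filter_le _ _
    _ = 81 := length_cells81

theorem tryEq (f : Nat)
    (ih : ∀ (bd : List (List Int)) (R C X : List (PySem.Set Int)), Sq9 bd →
      MaskInv bd R C X → (empties9 bd).length < f → solveFuelA f bd = btB R C X bd (empties9 bd))
    {bd : List (List Int)} {R C X : List (PySem.Set Int)} {r c : Nat} {rest : List (Nat × Nat)}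
    (hpre : Sq9 bd) (hinv : MaskInv bd R C X)
    (hE : empties9 bd = (r, c) :: rest) (hlen : rest.length < f) :
    ∀ ds : List Int, (∀ d ∈ ds, d ≠ 0) →
      tryA (solveFuelA f) bd r c ds =
        tryB (fun R' C' X' bd' => btB R' C' X' bd' rest) R C X bd r c ds := by
  obtain ⟨hr, hc, h0⟩ := head_empties9 hE
  intro ds
  induction ds with
  | nil => intro _; simp [tryA, tryB]
  | cons d ds ihds =>
    intro hnz
    have hd : d ≠ 0 := hnz d (by simp)
    show (if validA bd d (r, c) then
          (if solveFuelA f (setCell bd r c d) then true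
           else tryA (solveFuelA f) bd r c ds)
        else tryA (solveFuelA f) bd r c ds) =
      (if !(PySem.Set.contains (R.getD r []) d) && !(PySem.Set.contains (C.getD c []) d)
          && !(PySem.Set.contains (X.getD (boxIdx r c) []) d) then
        (if btB (R.set r (PySem.Set.add (R.getD r []) d))
                (C.set c (PySem.Set.add (C.getD c []) d))
                (X.set (boxIdx r c) (PySem.Set.add (X.getD (boxIdx r c) []) d))
                (setCell bd r c d) rest
         then true else tryB (fun R' C' X' bd' => btB R' C' X' bd' rest) R C X bd r c ds)
      else tryB (fun R' C' X' bd' => btB R' C' X' bd' rest) R C X bd r c ds)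
    rw [← validA_eq_mask hpre hr hc h0 hd hinv]
    have hrec : solveFuelA f (setCell bd r c d) =
        btB (R.set r (PySem.Set.add (R.getD r []) d))
            (C.set c (PySem.Set.add (C.getD c []) d))
            (X.set (boxIdx r c) (PySem.Set.add (X.getD (boxIdx r c) []) d))
            (setCell bd r c d) rest := by
      have hE' := empties9_setCell hpre hE hd
      rw [← hE']
      exact ih _ _ _ _ (pre9_setCell hpre hr c d) (maskInv_set hpre hr hc h0 hd ⟨hinv.1, hinv.2.1, hinv.2.2.1, hinv.2.2.2.1, hinv.2.2.2.2.1, hinv.2.2.2.2.2⟩)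
        (by rw [hE']; exact hlen)
    rw [hrec, ihds (fun x hx => hnz x (by simp [hx]))]

theorem mainEq : ∀ (f : Nat) (bd : List (List Int)) (R C X : List (PySem.Set Int)),
    Sq9 bd → MaskInv bd R C X → (empties9 bd).length < f →
    solveFuelA f bd = btB R C X bd (empties9 bd) := by
  intro f
  induction f with
  | zero => intro bd R C X _ _ h; omega
  | succ f ih =>
    intro bd R C X hpre hinv hlen
    show (match findEmpty bd with
        | none => true
        | some (r, c) => tryA (solveFuelA f) bd r c (PySem.List.pyRange 1 10 1)) =
      btB R C X bd (empties9 bd)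
    rw [findEmpty_eq bd, emptiesB_eq_empties9 hpre]
    cases hE : empties9 bd with
    | nil => simp [btB]
    | cons p rest =>
      obtain ⟨r, c⟩ := p
      rw [hE] at hlen
      simp only [List.head?_cons]
      show tryA (solveFuelA f) bd r c (PySem.List.pyRange 1 10 1) =
        tryB (fun R' C' X' bd' => btB R' C' X' bd' rest) R C X bd r c (PySem.List.pyRange 1 10 1)
      exact tryEq f ih hpre hinv hE (by simpa using hlen) _ (by decide)

theorem solveFuelA_none {bd : List (List Int)} (f : Nat) (h : findEmpty bd = none) :
    solveFuelA (f + 1) bd = true := by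
  show (match findEmpty bd with
      | none => true
      | some (r, c) => tryA (solveFuelA f) bd r c (PySem.List.pyRange 1 10 1)) = true
  rw [h]

theorem solve_spec : Claim_equal_solve := by
  intro board _ hpre
  unfold Spec_solve solve solve_alt
  by_cases hE : emptiesB board = []
  · simp only [hE, if_pos rfl]
    exact solveFuelA_none 81 (by rw [findEmpty_eq board, hE]; rfl)
  · have h9 : Sq9 board := by
      rcases hpre with h | h
      · exact h
      · exact absurd (emptiesB_nil h) hE
    simp only [hE]
    rw [if_neg not_false, emptiesB_eq_empties9 h9]
    exact mainEq 82 board _ _ _ h9 (initB_spec board) (by have := length_empties9 board; omega)
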